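-- pv_equiv track=rewrite | github.com/Tirik123/EidP01 | Übungsblätter/Blatt 10/Lösungen/exam.py | compute_pass_points
-- ===== SOURCE A (Python) =====
-- def number_of_fails(
--         student_points: dict[str, int],
--         pass_points: int) -> int:
--     '''Helper: Computes the number of students who failed the exam.'''
--     fails = 0
--
--     for points in student_points.values():
--         if points < pass_points:
--             fails += 1
--
--     return fails
--
-- def compute_pass_points(
--         student_points: dict[str, int],
--         max_points: int) -> int:
--     '''
--     Helper: Computes 'pass_points' so that at most 40% of the students failed.
--     '''
--     pass_points = max_points // 2
--
--     while pass_points > 0: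
--         if number_of_fails(
--                 student_points, pass_points) / len(student_points) > 0.4:
--             pass_points -= 1
--         else:
--             break
--
--     return pass_points
-- ===== SOURCE B (Python) =====
-- def compute_pass_points(student_points, max_points):
--     pass_points = max_points // 2
--     if pass_points <= 0 or not student_points:
--         return pass_points
--     vals = sorted(student_points.values())
--     n = len(vals)
--     k = 2 * n // 5  # largest allowed number of fails: fails/n <= 0.4
--     # fails(p) = #values < p <= k  iff  p <= vals[k]; clamp into [0, pass_points]
--     return max(0, min(pass_points, vals[k]))
-- ===== Notes on version B (the rewrite author's own statement) =====
-- stated objective: faster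
-- what changed: Replaces the decrement-by-one loop that recounts fails at every candidate threshold by one sort of the values and a closed-form clamp: the allowed fail count is k = 2*n//5 and the answer is max(0, min(max_points//2, sorted_vals[k])).
import Mathlib
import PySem

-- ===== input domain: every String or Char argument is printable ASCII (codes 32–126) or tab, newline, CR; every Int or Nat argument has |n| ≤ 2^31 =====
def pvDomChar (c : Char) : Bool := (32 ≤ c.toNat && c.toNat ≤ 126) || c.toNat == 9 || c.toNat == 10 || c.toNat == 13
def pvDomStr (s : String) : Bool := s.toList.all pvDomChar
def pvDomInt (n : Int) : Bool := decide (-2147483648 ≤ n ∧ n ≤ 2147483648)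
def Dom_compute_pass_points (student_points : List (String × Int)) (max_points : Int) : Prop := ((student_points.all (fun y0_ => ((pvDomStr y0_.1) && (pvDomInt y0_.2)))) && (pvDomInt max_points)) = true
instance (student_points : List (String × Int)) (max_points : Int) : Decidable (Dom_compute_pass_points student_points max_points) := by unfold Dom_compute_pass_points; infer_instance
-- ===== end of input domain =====

-- B replaces A's decrement-and-recount loop by one sort and a closed-form clamp (faster; same return value).
-- Note: the float comparison 'fails/len > 0.4' in A is ported exactly as the integer comparison
-- '5*fails > 2*len', which agrees with the float one for all lengths/counts in Dom (error << 1/(5n)).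
-- ===== PORT A =====
def numberOfFails (vals : List Int) (pass_points : Int) : Int :=
  vals.foldl (fun fails points => if points < pass_points then fails + 1 else fails) 0

-- the 'while pass_points > 0' loop of A, decrementing pass_points
def cppLoopA (vals : List Int) (p : Int) : Int :=
  if 0 < p then
    if 5 * numberOfFails vals p > 2 * (vals.length : Int) then cppLoopA vals (p - 1) else p
  else p
termination_by p.toNat
decreasing_by omega

def compute_pass_points (student_points : List (String × Int)) (max_points : Int) : Int :=
  cppLoopA (PySem.Dict.ofList student_points).values (PySem.Int.floordiv max_points 2)

-- ===== PORT B =====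
def compute_pass_points_alt (student_points : List (String × Int)) (max_points : Int) : Int :=
  let pass_points := PySem.Int.floordiv max_points 2
  if pass_points ≤ 0 ∨ student_points = [] then pass_points
  else
    let vals := PySem.List.sorted (PySem.Dict.ofList student_points).values (fun x => x) false
    let n := vals.length
    let k := 2 * n / 5
    -- vals[k]: k = 2n//5 < n for n ≥ 1, so the index is always in range (getD's default is never used)
    max 0 (min pass_points (vals.getD k 0))

-- ===== PRECONDITION & SPEC =====
-- Pre_ excludes exactly the inputs where A raises ZeroDivisionError: empty dict with max_points//2 > 0.
def Pre_compute_pass_points (student_points : List (String × Int)) (max_points : Int) : Prop :=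
  student_points ≠ [] ∨ max_points ≤ 1
instance (student_points : List (String × Int)) (max_points : Int) : Decidable (Pre_compute_pass_points student_points max_points) := by unfold Pre_compute_pass_points; infer_instance
def pvWitness_compute_pass_points : (List (String × Int)) × Int := ([("anna", 7), ("bob", 2)], 10)

def Spec_compute_pass_points (student_points : List (String × Int)) (max_points : Int) (out : Int) : Prop := out = compute_pass_points_alt student_points max_points
instance (student_points : List (String × Int)) (max_points : Int) (out : Int) : Decidable (Spec_compute_pass_points student_points max_points out) := by unfold Spec_compute_pass_points; infer_instance

-- ===== CLAIM (what is proved, stated in full; the proofs are below) =====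
def Claim_equal_compute_pass_points : Prop := ∀ (student_points : List (String × Int)) (max_points : Int), Dom_compute_pass_points student_points max_points → Pre_compute_pass_points student_points max_points → Spec_compute_pass_points student_points max_points (compute_pass_points student_points max_points)

-- ===== LEMMAS AND PROOFS =====

theorem foldl_fails (p : Int) (vals : List Int) : ∀ (acc : Int),
    vals.foldl (fun fails points => if points < p then fails + 1 else fails) acc
      = acc + (vals.countP (fun v => decide (v < p)) : Int) := by
  induction vals with
  | nil => intro acc; simp
  | cons x xs ih =>
    intro acc
    simp only [List.foldl_cons, List.countP_cons, ih]
    by_cases h : x < p <;> simp [h] <;> push_cast <;> ring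

theorem numberOfFails_eq_countP (vals : List Int) (p : Int) :
    numberOfFails vals p = (vals.countP (fun v => decide (v < p)) : Int) := by
  unfold numberOfFails; rw [foldl_fails]; ring

theorem countP_lt_le_iff (s : List Int)
    (hmono : ∀ (i j : Nat) (hi : i < s.length) (hj : j < s.length), i ≤ j → s[i] ≤ s[j])
    (k : Nat) (hk : k < s.length) (p : Int) :
    s.countP (fun v => decide (v < p)) ≤ k ↔ p ≤ s[k] := by
  constructor
  · intro h
    by_contra hp
    push_neg at hp   -- s[k] < p
    have htake : (s.take (k+1)).countP (fun v => decide (v < p)) = k + 1 := by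
      rw [List.countP_eq_length.2, List.length_take]
      · omega
      · intro x hx
        obtain ⟨i, hi, hxi⟩ := List.mem_iff_getElem.1 hx
        have hik : i ≤ k := by simp [List.length_take] at hi; omega
        have hilen : i < s.length := by omega
        rw [List.getElem_take] at hxi
        have : s[i] ≤ s[k] := hmono i k hilen hk hik
        subst hxi; simp; omega
    have := List.take_append_drop (k+1) s
    have hc : s.countP (fun v => decide (v < p))
        = (s.take (k+1)).countP (fun v => decide (v < p)) + (s.drop (k+1)).countP (fun v => decide (v < p)) := by
      conv_lhs => rw [← this]
      rw [List.countP_append]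
    omega
  · intro h
    have hdrop : (s.drop k).countP (fun v => decide (v < p)) = 0 := by
      rw [List.countP_eq_zero]
      intro x hx
      obtain ⟨j, hj, hxj⟩ := List.mem_iff_getElem.1 hx
      have hjlen : k + j < s.length := by
        simp [List.length_drop] at hj; omega
      rw [List.getElem_drop] at hxj
      have : s[k] ≤ s[k+j] := hmono k (k+j) hk hjlen (by omega)
      subst hxj; simp; omega
    have hc : s.countP (fun v => decide (v < p))
        = (s.take k).countP (fun v => decide (v < p)) + (s.drop k).countP (fun v => decide (v < p)) := by
      conv_lhs => rw [← List.take_append_drop k s]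
      rw [List.countP_append]
    have hle : (s.take k).countP (fun v => decide (v < p)) ≤ k := by
      have h1 := List.countP_le_length (p := fun v => decide (v < p)) (l := s.take k)
      simp [List.length_take] at h1; omega
    omega

theorem cppLoopA_closed (vals : List Int) (t : Int)
    (hok : ∀ p : Int, 5 * numberOfFails vals p ≤ 2 * (vals.length : Int) ↔ p ≤ t) :
    ∀ p : Int, 0 ≤ p → cppLoopA vals p = max 0 (min p t) := by
  have hnat : ∀ n : Nat, cppLoopA vals (n : Int) = max 0 (min (n : Int) t) := by
    intro n
    induction n with
    | zero => rw [cppLoopA]; simp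
    | succ m ih =>
      rw [cppLoopA]
      rw [if_pos (by push_cast; omega)]
      by_cases hle : ((m : Int) + 1) ≤ t
      · rw [if_neg (by have := (hok ((m : Int) + 1)).2 hle; push_cast; omega)]
        push_cast; omega
      · rw [if_pos (by have := (hok ((m : Int) + 1)).1; push_cast; omega)]
        have : ((m : Nat) + 1 : Int) - 1 = (m : Int) := by push_cast; omega
        push_cast at this ⊢
        rw [this, ih]
        omega
  intro p hp
  lift p to Nat using hp
  exact hnat p

theorem values_ne_nil (x : String × Int) (rest : List (String × Int)) :
    (PySem.Dict.ofList (x :: rest)).values ≠ [] := by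
  have hk : (PySem.Dict.ofList (x :: rest)).keys
      = PySem.Set.update (PySem.Dict.empty (κ := String) (ν := Int)).keys ((x :: rest).map Prod.fst) := by
    exact PySem.Dict.keys_foldl_insert_key (x :: rest) Prod.fst (fun d p => p.2) PySem.Dict.empty
  intro hv
  have hitems : (PySem.Dict.ofList (x :: rest)).items = [] := by
    simpa [PySem.Dict.values, List.map_eq_nil_iff] using hv
  have : (PySem.Dict.ofList (x :: rest)).keys = [] := by
    simp [PySem.Dict.keys, hitems]
  rw [hk] at this
  have hm : x.1 ∈ PySem.Set.update (PySem.Dict.empty (κ := String) (ν := Int)).keys ((x :: rest).map Prod.fst) := by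
    rw [PySem.Set.mem_update]
    right; simp
  rw [this] at hm
  simp at hm

theorem floordiv_two_nonpos (mp : Int) : PySem.Int.floordiv mp 2 ≤ 0 ↔ mp ≤ 1 := by
  have h : Int.fdiv mp 2 = mp / 2 - if (0:Int) ≤ 2 ∨ (2:Int) ∣ mp then 0 else 1 := Int.fdiv_eq_ediv
  simp at h
  simp [PySem.Int.floordiv, h]; omega

theorem main_spec (sp : List (String × Int)) (mp : Int) (hpre : sp ≠ [] ∨ mp ≤ 1) :
    compute_pass_points sp mp = compute_pass_points_alt sp mp := by
  unfold compute_pass_points compute_pass_points_alt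
  by_cases hm : PySem.Int.floordiv mp 2 ≤ 0
  · rw [if_pos (Or.inl hm), cppLoopA, if_neg (by omega)]
  · have hsp : sp ≠ [] := by
      rcases hpre with h | h
      · exact h
      · exact absurd ((floordiv_two_nonpos mp).2 h) hm
    rw [if_neg (fun hor => hor.elim hm hsp)]
    obtain ⟨x, rest, rfl⟩ := List.exists_cons_of_ne_nil hsp
    set vals := (PySem.Dict.ofList (x :: rest)).values with hvals
    set s := PySem.List.sorted vals (fun x => x) false with hs
    have hvne : vals ≠ [] := values_ne_nil x rest
    have hlen : s.length = vals.length := by rw [hs]; exact PySem.List.length_sorted vals (fun x => x) false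
    have hn1 : 0 < vals.length := List.length_pos_of_ne_nil hvne
    have hk : 2 * s.length / 5 < s.length := by omega
    have hget : s.getD (2 * s.length / 5) 0 = s[2 * s.length / 5] := List.getD_eq_getElem s 0 hk
    have hperm : s.Perm vals := by rw [hs]; exact PySem.List.sorted_perm vals (fun x => x) false
    have hok : ∀ p : Int, 5 * numberOfFails vals p ≤ 2 * (vals.length : Int) ↔ p ≤ s[2 * s.length / 5] := by
      intro p
      rw [numberOfFails_eq_countP, ← hperm.countP_eq]
      have hcount := countP_lt_le_iff s
        (fun i j hi hj hij => PySem.List.sorted_id_getElem_mono vals hij hj)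
        (2 * s.length / 5) hk p
      rw [← hcount]
      omega
    rw [cppLoopA_closed vals s[2 * s.length / 5] hok (PySem.Int.floordiv mp 2) (by omega)]
    simp only [hget]


-- ===== VERDICT (by name: the statement is the Claim_ definition above) =====
theorem compute_pass_points_spec : Claim_equal_compute_pass_points := by
  intro sp mp _ hpre
  unfold Pre_compute_pass_points at hpre
  unfold Spec_compute_pass_points
  exact main_spec sp mp hpre
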